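-- pv_equiv track=rewrite | github.com/Hojland/bert_token_classifier_wnut | src/model/text_utils.py | _reconstruct_tokens_from_word_piece
-- ===== SOURCE A (Python) =====
-- def _reconstruct_tokens_from_word_piece(wordpiece_pred_seq):
--     tokens, token_preds = [], []
--     for wp, p in wordpiece_pred_seq:
--         if wp.startswith("##"):
--             tokens[-1] += wp[2:]
--             # Ensure all wordpieces of same word are labelled in the same way.
--             # Warning: This prioritizes B-label's before I-label's, but the specific ordering
--             # depends on your actual labels (string comparison).
--             token_preds[-1] = min(token_preds[-1], p)
--         else:
--             tokens.append(wp)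
--             token_preds.append(p)
--     return tokens, token_preds
-- ===== SOURCE B (Python) =====
-- def _reconstruct_tokens_from_word_piece(wordpiece_pred_seq):
--     # Pass 1: segment the wordpiece sequence into word groups.
--     groups = []
--     for wp, p in wordpiece_pred_seq:
--         if wp.startswith("##"):
--             groups[-1].append((wp, p))
--         else:
--             groups.append([(wp, p)])
--     # Pass 2: render each group into a token and a merged prediction.
--     tokens = [g[0][0] + "".join(wp[2:] for wp, _ in g[1:]) for g in groups]
--     token_preds = [min(p for _, p in g) for g in groups]
--     return tokens, token_preds
-- ===== Notes on version B (the rewrite author's own statement) =====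
-- stated objective: alternative
-- what changed: Replaces A's single loop that mutates the last element of two parallel output lists with a two-pass decomposition: first segment the wordpieces into word groups, then render each group into its joined token and its minimum prediction.
import Mathlib
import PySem

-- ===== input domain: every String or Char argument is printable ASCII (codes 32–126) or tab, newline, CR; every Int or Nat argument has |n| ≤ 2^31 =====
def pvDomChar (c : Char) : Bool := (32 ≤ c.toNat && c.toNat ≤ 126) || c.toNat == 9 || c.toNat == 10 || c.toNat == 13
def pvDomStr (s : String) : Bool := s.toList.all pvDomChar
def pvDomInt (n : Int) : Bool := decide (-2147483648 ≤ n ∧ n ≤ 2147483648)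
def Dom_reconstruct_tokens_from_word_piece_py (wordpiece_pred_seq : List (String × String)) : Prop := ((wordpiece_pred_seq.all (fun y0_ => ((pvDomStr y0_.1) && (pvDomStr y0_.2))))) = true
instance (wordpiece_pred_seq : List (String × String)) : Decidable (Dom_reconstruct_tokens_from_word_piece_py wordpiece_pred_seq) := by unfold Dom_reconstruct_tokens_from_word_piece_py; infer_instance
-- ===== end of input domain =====

-- B replaces A's single loop mutating the last elements of two parallel lists with a
-- two-pass decomposition (segment into word groups, then render each group); same cost.


-- ===== PORT A =====
-- tokens[-1] += wp[2:]  (Pre_ guarantees the list is nonempty here; on [] Python raises IndexError)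
def pvUpdLastStr (ts : List String) (s : String) : List String :=
  ts.dropLast ++ [ts.getLast! ++ s]

-- token_preds[-1] = min(token_preds[-1], p)
def pvUpdLastMin (ps : List String) (p : String) : List String :=
  ps.dropLast ++ [min ps.getLast! p]

def pvStepA (st : List String × List String) (x : String × String) : List String × List String :=
  if PySem.Str.startswith x.1 "##" then
    (pvUpdLastStr st.1 (PySem.Str.slice x.1 (some 2) none), pvUpdLastMin st.2 x.2)
  else
    (st.1 ++ [x.1], st.2 ++ [x.2])

def reconstruct_tokens_from_word_piece_py (wordpiece_pred_seq : List (String × String)) : List String × List String :=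
  wordpiece_pred_seq.foldl pvStepA ([], [])

-- ===== PORT B =====
-- groups[-1].append((wp, p))  (Pre_ guarantees a group is open here)
def pvAppendLastGrp (gs : List (List (String × String))) (x : String × String) : List (List (String × String)) :=
  gs.dropLast ++ [gs.getLast! ++ [x]]

def pvStepB (gs : List (List (String × String))) (x : String × String) : List (List (String × String)) :=
  if PySem.Str.startswith x.1 "##" then pvAppendLastGrp gs x else gs ++ [[x]]

def pvGroups (wordpiece_pred_seq : List (String × String)) : List (List (String × String)) :=
  wordpiece_pred_seq.foldl pvStepB []

-- g[0][0] + "".join(wp[2:] for wp, _ in g[1:])  (join rendered as the left fold of ++)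
def pvTokOf (g : List (String × String)) : String :=
  match g with
  | [] => ""
  | x :: rest => rest.foldl (fun a q => a ++ PySem.Str.slice q.1 (some 2) none) x.1

-- min(p for _, p in g)  (min of a nonempty sequence = running min)
def pvPredOf (g : List (String × String)) : String :=
  match g with
  | [] => ""
  | x :: rest => rest.foldl (fun a q => min a q.2) x.2

def reconstruct_tokens_from_word_piece_py_alt (wordpiece_pred_seq : List (String × String)) : List String × List String :=
  ((pvGroups wordpiece_pred_seq).map pvTokOf, (pvGroups wordpiece_pred_seq).map pvPredOf)

-- ===== PRECONDITION & SPEC =====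
-- Pre_ excludes exactly the inputs whose FIRST wordpiece starts with "##": there A (and B)
-- indexes the empty output list and raises IndexError.
def Pre_reconstruct_tokens_from_word_piece_py (wordpiece_pred_seq : List (String × String)) : Prop :=
  wordpiece_pred_seq = [] ∨ PySem.Str.startswith (wordpiece_pred_seq.head!).1 "##" = false
instance (wordpiece_pred_seq : List (String × String)) : Decidable (Pre_reconstruct_tokens_from_word_piece_py wordpiece_pred_seq) := by unfold Pre_reconstruct_tokens_from_word_piece_py; infer_instance

def pvWitness_reconstruct_tokens_from_word_piece_py : (List (String × String)) :=
  [("he", "B-PER"), ("##llo", "I-PER"), ("world", "O")]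

def Spec_reconstruct_tokens_from_word_piece_py (wordpiece_pred_seq : List (String × String)) (out : List String × List String) : Prop := out = reconstruct_tokens_from_word_piece_py_alt wordpiece_pred_seq
instance (wordpiece_pred_seq : List (String × String)) (out : List String × List String) : Decidable (Spec_reconstruct_tokens_from_word_piece_py wordpiece_pred_seq out) := by unfold Spec_reconstruct_tokens_from_word_piece_py; infer_instance

-- ===== CLAIM (what is proved, stated in full; the proofs are below) =====
def Claim_equal_reconstruct_tokens_from_word_piece_py : Prop := ∀ (wordpiece_pred_seq : List (String × String)), Dom_reconstruct_tokens_from_word_piece_py wordpiece_pred_seq → Pre_reconstruct_tokens_from_word_piece_py wordpiece_pred_seq → Spec_reconstruct_tokens_from_word_piece_py wordpiece_pred_seq (reconstruct_tokens_from_word_piece_py wordpiece_pred_seq)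

-- ===== LEMMAS AND PROOFS =====

theorem pvUpdLastStr_concat (ts : List String) (t s : String) :
    pvUpdLastStr (ts ++ [t]) s = ts ++ [t ++ s] := by
  simp [pvUpdLastStr, List.getLast!_eq_getLast?_getD]

theorem pvUpdLastMin_concat (ps : List String) (t p : String) :
    pvUpdLastMin (ps ++ [t]) p = ps ++ [min t p] := by
  simp [pvUpdLastMin, List.getLast!_eq_getLast?_getD]

theorem pvAppendLastGrp_concat (gs : List (List (String × String))) (g : List (String × String)) (x : String × String) :
    pvAppendLastGrp (gs ++ [g]) x = gs ++ [g ++ [x]] := by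
  simp [pvAppendLastGrp, List.getLast!_eq_getLast?_getD]

theorem pvTokOf_concat (y : String × String) (r : List (String × String)) (x : String × String) :
    pvTokOf (y :: (r ++ [x])) = pvTokOf (y :: r) ++ PySem.Str.slice x.1 (some 2) none := by
  simp [pvTokOf, List.foldl_append]

theorem pvPredOf_concat (y : String × String) (r : List (String × String)) (x : String × String) :
    pvPredOf (y :: (r ++ [x])) = min (pvPredOf (y :: r)) x.2 := by
  simp [pvPredOf, List.foldl_append]

theorem pvLoop_eq (l : List (String × String)) (gs : List (List (String × String)))
    (hne : ∀ g ∈ gs, g ≠ [])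
    (h0 : gs = [] → l = [] ∨ PySem.Str.startswith (l.head!).1 "##" = false) :
    l.foldl pvStepA (gs.map pvTokOf, gs.map pvPredOf)
      = ((l.foldl pvStepB gs).map pvTokOf, (l.foldl pvStepB gs).map pvPredOf) := by
  induction l generalizing gs with
  | nil => simp
  | cons x t ih =>
      by_cases hsw : PySem.Chars.startswith x.1.toList ['#', '#'] = true
      · -- continuation piece: gs cannot be empty
        have hgs : gs ≠ [] := by
          intro h
          rcases h0 h with h' | h'
          · exact absurd h' (by simp)
          · have : PySem.Chars.startswith x.1.toList ['#', '#'] = false := by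
              simpa using h'
            simp [this] at hsw
        rcases List.eq_nil_or_concat gs with h | ⟨gs', g, rfl⟩
        · exact absurd h hgs
        have hg : g ≠ [] := hne g (by simp)
        rcases g with _ | ⟨y, r⟩
        · exact absurd rfl hg
        simp only [List.foldl_cons, List.concat_eq_append] at *
        have hstep : pvStepA ((gs' ++ [y :: r]).map pvTokOf, (gs' ++ [y :: r]).map pvPredOf)
            x = ((gs' ++ [(y :: r) ++ [x]]).map pvTokOf, (gs' ++ [(y :: r) ++ [x]]).map pvPredOf) := by
          simp [pvStepA, hsw, pvUpdLastStr_concat, pvUpdLastMin_concat, pvTokOf_concat, pvPredOf_concat]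
        have hstepB : pvStepB (gs' ++ [y :: r]) x = gs' ++ [(y :: r) ++ [x]] := by
          simp [pvStepB, hsw, pvAppendLastGrp_concat]
        rw [hstep, hstepB]
        exact ih (gs' ++ [(y :: r) ++ [x]])
          (by intro g hg'; rcases List.mem_append.mp hg' with h | h
              · exact hne g (List.mem_append.mpr (Or.inl h))
              · simp at h; simp [h])
          (by intro h; simp at h)
      · -- new word
        simp only [Bool.not_eq_true] at hsw
        simp only [List.foldl_cons]
        have hstep : pvStepA (gs.map pvTokOf, gs.map pvPredOf) x
            = ((gs ++ [[x]]).map pvTokOf, (gs ++ [[x]]).map pvPredOf) := by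
          simp [pvStepA, hsw, pvTokOf, pvPredOf]
        have hstepB : pvStepB gs x = gs ++ [[x]] := by simp [pvStepB, hsw]
        rw [hstep, hstepB]
        exact ih (gs ++ [[x]])
          (by intro g hg'; rcases List.mem_append.mp hg' with h | h
              · exact hne g h
              · simp at h; simp [h])
          (by intro h; simp at h)

-- ===== VERDICT (by name: the statement is the Claim_ definition above) =====
theorem reconstruct_tokens_from_word_piece_py_spec : Claim_equal_reconstruct_tokens_from_word_piece_py := by
  intro l _hdom hpre
  unfold Spec_reconstruct_tokens_from_word_piece_py reconstruct_tokens_from_word_piece_py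
    reconstruct_tokens_from_word_piece_py_alt pvGroups
  have := pvLoop_eq l [] (by simp) (fun _ => hpre)
  simpa using this
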